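-- pv_equiv track=rewrite | github.com/chrisRduckworth/Advent-of-Code-2024 | day_22.py | calc_secret
-- ===== SOURCE A (Python) =====
-- def calc_secret(init, count):
--     secret = init
--     for i in range(count):
--         m = secret << 6
--         secret = (m ^ secret) % 16777216
--         d = secret >> 5
--         secret = (d ^ secret) % 16777216
--         m2 = secret << 11
--         secret = (m2 ^ secret) % 16777216
--     return secret
-- ===== SOURCE B (Python) =====
-- def _step(x):
--     x = (x ^ (x << 6)) & 0xFFFFFF
--     x = (x ^ (x >> 5)) & 0xFFFFFF
--     x = (x ^ (x << 11)) & 0xFFFFFF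
--     return x
--
--
-- def _apply(mat, v):
--     # mat[i] is the image of basis vector 2**i under the linear map; xor the
--     # rows selected by v's bits.
--     r = 0
--     for c in mat:
--         if v & 1:
--             r ^= c
--         v >>= 1
--     return r
--
--
-- def calc_secret(init, count):
--     if count <= 0:
--         return init
--     # one PRNG step is GF(2)-linear on 24-bit states: raise its matrix to
--     # the count-th power by repeated squaring.
--     mat = [_step(1 << i) for i in range(24)]
--     v = init % 16777216
--     n = count
--     while n:
--         if n & 1:
--             v = _apply(mat, v)
--         mat = [_apply(mat, c) for c in mat]
--         n >>= 1
--     return v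
-- ===== Notes on version B (the rewrite author's own statement) =====
-- stated objective: faster
-- what changed: B treats one PRNG step as a GF(2)-linear map on 24-bit states and computes step^count by binary exponentiation of the step's 24x24 bit matrix (rows packed as ints), instead of iterating the step count times.
import Mathlib
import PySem

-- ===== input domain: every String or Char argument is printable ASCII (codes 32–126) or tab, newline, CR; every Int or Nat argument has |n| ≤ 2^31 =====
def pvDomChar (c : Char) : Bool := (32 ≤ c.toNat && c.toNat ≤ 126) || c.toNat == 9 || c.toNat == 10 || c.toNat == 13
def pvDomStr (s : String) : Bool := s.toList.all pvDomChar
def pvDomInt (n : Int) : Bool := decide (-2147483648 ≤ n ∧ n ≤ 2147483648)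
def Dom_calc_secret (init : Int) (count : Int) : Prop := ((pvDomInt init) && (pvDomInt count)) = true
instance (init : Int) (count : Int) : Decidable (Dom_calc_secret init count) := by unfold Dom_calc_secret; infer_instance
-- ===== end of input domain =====

-- B replaces the count-fold iteration of the AoC day-22 PRNG step by binary
-- exponentiation of the step's GF(2) 24×24 bit matrix (rows packed as ints):
-- objective "faster" (O(log count) matrix squarings instead of count steps).

-- ===== PORT A =====
def calc_secret (init : Int) (count : Int) : Int :=
  (PySem.List.pyRange 0 count 1).foldl
    (fun secret _ =>
      let m := secret <<< (6 : Nat)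
      let secret1 := PySem.Int.mod (PySem.Int.bxor m secret) 16777216
      let d := secret1 >>> (5 : Nat)
      let secret2 := PySem.Int.mod (PySem.Int.bxor d secret1) 16777216
      let m2 := secret2 <<< (11 : Nat)
      PySem.Int.mod (PySem.Int.bxor m2 secret2) 16777216)
    init

-- ===== PORT B =====
-- _step of Source B (one PRNG step, used only on the 24 basis vectors)
def pvStep (x : Int) : Int :=
  let x1 := PySem.Int.band (PySem.Int.bxor x (x <<< (6 : Nat))) 16777215
  let x2 := PySem.Int.band (PySem.Int.bxor x1 (x1 >>> (5 : Nat))) 16777215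
  PySem.Int.band (PySem.Int.bxor x2 (x2 <<< (11 : Nat))) 16777215

-- _apply of Source B: xor together the rows of mat selected by v's bits
def pvApply (mat : List Int) (v : Int) : Int :=
  (mat.foldl
    (fun (rv : Int × Int) c =>
      (if PySem.Int.band rv.2 1 ≠ 0 then PySem.Int.bxor rv.1 c else rv.1, rv.2 >>> (1 : Nat)))
    ((0 : Int), v)).1

-- the 'while n:' loop of Source B; it is entered only with n = count > 0 and n only
-- decreases ('n >>= 1'), so it is transcribed as structural recursion on n : Nat
def pvLoop (mat : List Int) (v : Int) (n : Nat) : Int :=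
  if n = 0 then v
  else
    pvLoop (mat.map (fun c => pvApply mat c))
      (if n % 2 = 1 then pvApply mat v else v) (n / 2)
  termination_by n
  decreasing_by omega

def calc_secret_alt (init : Int) (count : Int) : Int :=
  if count ≤ 0 then init
  else
    let mat := List.map (fun (i : Nat) => pvStep ((1 : Int) <<< i)) (List.range 24)
    pvLoop mat (PySem.Int.mod init 16777216) count.toNat

-- ===== PRECONDITION & SPEC =====
def Spec_calc_secret (init : Int) (count : Int) (out : Int) : Prop := out = calc_secret_alt init count
instance (init : Int) (count : Int) (out : Int) : Decidable (Spec_calc_secret init count out) := by unfold Spec_calc_secret; infer_instance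

-- ===== CLAIM (what is proved, stated in full; the proofs are below) =====
def Claim_equal_calc_secret : Prop := ∀ (init : Int) (count : Int), Dom_calc_secret init count → Spec_calc_secret init count (calc_secret init count)

-- ===== LEMMAS AND PROOFS =====

-- Nat-level model of one PRNG step (values are always reduced mod 2^24)
def nStage1 (x : Nat) : Nat := (x ^^^ (x <<< 6)) % 16777216
def nStage2 (x : Nat) : Nat := (x ^^^ (x >>> 5)) % 16777216
def nStage3 (x : Nat) : Nat := (x ^^^ (x <<< 11)) % 16777216
def nStep (x : Nat) : Nat := nStage3 (nStage2 (nStage1 x))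

-- A's loop body as a named function (definitionally the lambda in calc_secret)
def astepF (secret : Int) : Int :=
  let m := secret <<< (6 : Nat)
  let secret1 := PySem.Int.mod (PySem.Int.bxor m secret) 16777216
  let d := secret1 >>> (5 : Nat)
  let secret2 := PySem.Int.mod (PySem.Int.bxor d secret1) 16777216
  let m2 := secret2 <<< (11 : Nat)
  PySem.Int.mod (PySem.Int.bxor m2 secret2) 16777216

-- Nat-level model of Source B's _apply
def nApply : List Nat → Nat → Nat
  | [], _ => 0
  | c :: t, v => (if v % 2 = 1 then c else 0) ^^^ nApply t (v / 2)

theorem pow24 : (16777216 : Nat) = 2 ^ 24 := by norm_num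

theorem nStage1_mod (x : Nat) : nStage1 (x % 16777216) = nStage1 x := by
  unfold nStage1; rw [pow24]
  apply Nat.eq_of_testBit_eq; intro i
  simp only [Nat.testBit_mod_two_pow, Nat.testBit_xor, Nat.testBit_shiftLeft]
  by_cases h24 : i < 24
  · by_cases h6 : 6 ≤ i
    · have h' : i - 6 < 24 := by omega
      simp [h24, h6, h']
    · simp [h24, h6]
  · simp [h24]

theorem nStep_lt (x : Nat) : nStep x < 16777216 := by
  unfold nStep nStage3; omega

theorem nStep_mod (x : Nat) : nStep (x % 16777216) = nStep x := by
  unfold nStep; rw [nStage1_mod]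

theorem stageL_linear (k a b : Nat) :
    ((a ^^^ b) ^^^ ((a ^^^ b) <<< k)) % 16777216
      = ((a ^^^ (a <<< k)) % 16777216) ^^^ ((b ^^^ (b <<< k)) % 16777216) := by
  rw [pow24]
  apply Nat.eq_of_testBit_eq; intro i
  simp only [Nat.testBit_mod_two_pow, Nat.testBit_xor, Nat.testBit_shiftLeft]
  by_cases h24 : i < 24
  · by_cases hk : k ≤ i
    · simp only [h24, hk, decide_true, Bool.true_and]
      cases a.testBit i <;> cases b.testBit i <;>
        cases a.testBit (i - k) <;> cases b.testBit (i - k) <;> rfl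
    · simp only [h24, decide_true, Bool.true_and, ge_iff_le, hk, decide_false,
        Bool.false_and, Bool.xor_false]
  · simp [h24]

theorem stageR_linear (k a b : Nat) :
    ((a ^^^ b) ^^^ ((a ^^^ b) >>> k)) % 16777216
      = ((a ^^^ (a >>> k)) % 16777216) ^^^ ((b ^^^ (b >>> k)) % 16777216) := by
  rw [pow24]
  apply Nat.eq_of_testBit_eq; intro i
  simp only [Nat.testBit_mod_two_pow, Nat.testBit_xor, Nat.testBit_shiftRight]
  by_cases h24 : i < 24
  · simp only [h24, decide_true, Bool.true_and]
    cases a.testBit i <;> cases b.testBit i <;>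
      cases a.testBit (k + i) <;> cases b.testBit (k + i) <;> rfl
  · simp [h24]

theorem nStage1_linear (a b : Nat) : nStage1 (a ^^^ b) = nStage1 a ^^^ nStage1 b :=
  stageL_linear 6 a b

theorem nStage2_linear (a b : Nat) : nStage2 (a ^^^ b) = nStage2 a ^^^ nStage2 b :=
  stageR_linear 5 a b

theorem nStage3_linear (a b : Nat) : nStage3 (a ^^^ b) = nStage3 a ^^^ nStage3 b :=
  stageL_linear 11 a b

theorem nStep_linear (a b : Nat) : nStep (a ^^^ b) = nStep a ^^^ nStep b := by
  unfold nStep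
  rw [nStage1_linear, nStage2_linear, nStage3_linear]

-- complement: subtracting from 2^n - 1 is xor with 2^n - 1
theorem compl_eq_xor : ∀ (n w : Nat), w < 2 ^ n → 2 ^ n - 1 - w = (2 ^ n - 1) ^^^ w := by
  intro n
  induction n with
  | zero => intro w h; interval_cases w <;> rfl
  | succ n ih =>
    intro w h
    have h2 : 2 ^ (n + 1) = 2 * 2 ^ n := by ring
    have hq : w / 2 < 2 ^ n := by omega
    have hdiv : ((2 ^ (n + 1) - 1) ^^^ w) / 2 = (2 ^ n - 1) ^^^ (w / 2) := by
      rw [Nat.xor_div_two]; congr 1; omega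
    have hmod : ((2 ^ (n + 1) - 1) ^^^ w) % 2 = 1 - w % 2 := by
      have hb := Nat.testBit_xor (2 ^ (n + 1) - 1) w 0
      rw [Nat.testBit_two_pow_sub_one] at hb
      simp only [Nat.testBit_zero] at hb
      have hd : (decide (0 < n + 1)) = true := by simp
      rw [hd] at hb
      rcases Nat.mod_two_eq_zero_or_one w with hw | hw <;>
        rcases Nat.mod_two_eq_zero_or_one ((2 ^ (n + 1) - 1) ^^^ w) with hr | hr <;>
        simp [hw, hr] at hb ⊢
    have := ih (w / 2) hq
    omega

-- mod / cast facts used to push the Int computation down to the Nat model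
theorem pymod_natCast (a : Nat) : PySem.Int.mod (a : Int) 16777216 = ((a % 16777216 : Nat) : Int) := by
  exact_mod_cast PySem.Int.mod_natCast a 16777216

-- stage 1 of A's body, for an ARBITRARY (possibly negative) Int input
theorem tb63 (j : Nat) : Nat.testBit 63 j = decide (j < 6) := by
  rw [show (63 : Nat) = 2 ^ 6 - 1 by norm_num, Nat.testBit_two_pow_sub_one]

theorem s1_eq (x : Int) :
    PySem.Int.mod (PySem.Int.bxor (x <<< (6 : Nat)) x) 16777216
      = ((nStage1 ((PySem.Int.mod x 16777216).toNat) : Nat) : Int) := by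
  by_cases hx : 0 ≤ x
  · lift x to ℕ using hx
    rw [← Int.natCast_shiftLeft, PySem.Int.bxor_natCast, pymod_natCast, pymod_natCast,
      Int.toNat_natCast]
    congr 1
    rw [nStage1_mod]
    unfold nStage1
    rw [Nat.xor_comm]
  · set u : Nat := (-x - 1).toNat with hu_def
    have hu : x = -(u : Int) - 1 := by omega
    have hx64 : x <<< (6 : Nat) = x * 64 := by rw [Int.shiftLeft_eq]; norm_num
    have hneg64 : ¬ (0 ≤ x * 64) := by omega
    have hb : PySem.Int.bxor (x * 64) x = (((64 * u + 63) ^^^ u : Nat) : Int) := by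
      simp only [PySem.Int.bxor]
      rw [if_neg hneg64, if_neg (by omega : ¬ (0 ≤ x))]
      congr 2 <;> omega
    rw [hx64, hb, pymod_natCast]
    have hm : PySem.Int.mod x 16777216 = ((16777215 - u % 16777216 : Nat) : Int) := by
      rw [PySem.Int.mod_eq_emod_of_pos (by norm_num)]
      omega
    rw [hm, Int.toNat_natCast]
    congr 1
    have hc : 16777215 - u % 16777216 = (2 ^ 24 - 1) ^^^ (u % 2 ^ 24) := by
      rw [← compl_eq_xor 24 (u % 2 ^ 24) (Nat.mod_lt _ (by norm_num))]
      norm_num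
    rw [hc]
    unfold nStage1
    rw [pow24]
    apply Nat.eq_of_testBit_eq; intro i
    rw [show 64 * u + 63 = 2 ^ 6 * u + 63 by norm_num]
    simp only [Nat.testBit_mod_two_pow, Nat.testBit_xor, Nat.testBit_shiftLeft,
      Nat.testBit_two_pow_mul_add u (show (63 : Nat) < 2 ^ 6 by norm_num),
      Nat.testBit_two_pow_sub_one, tb63]
    by_cases h24 : i < 24
    · by_cases h6 : 6 ≤ i
      · have h1 : ¬ i < 6 := by omega
        have h2 : i - 6 < 24 := by omega
        simp only [h24, h6, h1, h2, decide_true, decide_false, if_false, Bool.true_and]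
        cases u.testBit i <;> cases u.testBit (i - 6) <;> rfl
      · have h1 : i < 6 := by omega
        simp only [h24, h6, h1, decide_true, decide_false, Bool.true_and,
          Bool.false_and, Bool.xor_false]
        cases u.testBit i <;> rfl
    · simp [h24]

theorem s2_cast (a : Nat) :
    PySem.Int.mod (PySem.Int.bxor ((a : Int) >>> (5 : Nat)) (a : Int)) 16777216
      = ((nStage2 a : Nat) : Int) := by
  rw [← Int.natCast_shiftRight, PySem.Int.bxor_natCast, pymod_natCast]
  unfold nStage2
  rw [Nat.xor_comm]

theorem s3_cast (a : Nat) :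
    PySem.Int.mod (PySem.Int.bxor ((a : Int) <<< (11 : Nat)) (a : Int)) 16777216
      = ((nStage3 a : Nat) : Int) := by
  rw [← Int.natCast_shiftLeft, PySem.Int.bxor_natCast, pymod_natCast]
  unfold nStage3
  rw [Nat.xor_comm]

theorem astepF_eq (x : Int) :
    astepF x = ((nStep ((PySem.Int.mod x 16777216).toNat) : Nat) : Int) := by
  unfold astepF
  simp only [s1_eq, s2_cast, s3_cast]
  rfl

theorem astepF_cast (m : Nat) :
    astepF (m : Int) = ((nStep m : Nat) : Int) := by
  rw [astepF_eq, pymod_natCast]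
  rw [Int.toNat_natCast, nStep_mod]

-- Source B's _apply agrees with the Nat model on casts
theorem pvApply_aux (mn : List Nat) : ∀ (r vn : Nat),
    ((List.map (fun (c : Nat) => (c : Int)) mn).foldl
      (fun (rv : Int × Int) c =>
        (if PySem.Int.band rv.2 1 ≠ 0 then PySem.Int.bxor rv.1 c else rv.1,
         rv.2 >>> (1 : Nat)))
      ((r : Int), (vn : Int))).1 = ((r ^^^ nApply mn vn : Nat) : Int) := by
  induction mn with
  | nil =>
    intro r vn
    show ((r : Int)) = ((r ^^^ nApply [] vn : Nat) : Int)
    rw [show nApply [] vn = 0 from rfl, Nat.xor_zero]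
  | cons c t ih =>
    intro r vn
    simp only [List.map_cons, List.foldl_cons]
    have hband : PySem.Int.band ((vn : Int)) 1 = ((vn % 2 : Nat) : Int) := by
      have h1 := PySem.Int.band_natCast vn 1
      rw [show ((1 : Nat) : Int) = 1 from rfl, Nat.and_one_is_mod] at h1
      exact h1
    have hshift : ((vn : Int)) >>> (1 : Nat) = ((vn / 2 : Nat) : Int) := by
      rw [← Int.natCast_shiftRight]
      congr 1
    by_cases hv : vn % 2 = 1
    · have hcond : PySem.Int.band ((vn : Int)) 1 ≠ 0 := by rw [hband, hv]; decide
      rw [if_pos hcond, hshift, PySem.Int.bxor_natCast, ih (r ^^^ c) (vn / 2)]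
      simp only [nApply, if_pos hv]
      congr 1
      rw [Nat.xor_assoc]
    · have hcond : ¬ PySem.Int.band ((vn : Int)) 1 ≠ 0 := by
        rw [hband]
        have h0 : vn % 2 = 0 := by omega
        rw [h0]
        decide
      rw [if_neg hcond, hshift, ih r (vn / 2)]
      simp only [nApply, if_neg hv]
      congr 1
      rw [Nat.zero_xor]

theorem pvApply_cast (mn : List Nat) (vn : Nat) :
    pvApply (List.map (fun (c : Nat) => (c : Int)) mn) (vn : Int) = ((nApply mn vn : Nat) : Int) := by
  unfold pvApply
  have h := pvApply_aux mn 0 vn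
  simpa using h

-- bit-recombination behind the basis-representation lemma
theorem key_bits (v m k : Nat) :
    ((v % 2) <<< k) ^^^ ((v / 2 % 2 ^ m) <<< (k + 1)) = (v % 2 ^ (m + 1)) <<< k := by
  apply Nat.eq_of_testBit_eq; intro j
  have hv2 : v / 2 = v >>> 1 := by rw [Nat.shiftRight_eq_div_pow]
  rw [show v % 2 = v % 2 ^ 1 by norm_num, hv2]
  simp only [Nat.testBit_xor, Nat.testBit_shiftLeft, Nat.testBit_mod_two_pow,
    Nat.testBit_shiftRight]
  by_cases h1 : k ≤ j
  · by_cases h2 : k + 1 ≤ j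
    · have e1 : ¬ (j - k < 1) := by omega
      have e2 : 1 + (j - (k + 1)) = j - k := by omega
      by_cases h3 : j - (k + 1) < m
      · have h4 : j - k < m + 1 := by omega
        simp [h1, h2, e1, e2, h3, h4]
      · have h4 : ¬ (j - k < m + 1) := by omega
        simp [h1, h2, e1, e2, h3, h4]
    · have e0 : j = k := by omega
      have e1 : j - k < 1 := by omega
      have e2 : j - k < m + 1 := by omega
      simp [h1, h2, e1, e2]
  · simp [h1, show ¬ (k + 1 ≤ j) by omega]

theorem lin_zero (g : Nat → Nat) (hg : ∀ a b, g (a ^^^ b) = g a ^^^ g b) : g 0 = 0 := by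
  simpa using hg 0 0

-- applying the packed matrix of a linear map computes the map
theorem nApply_rep (g : Nat → Nat) (hg : ∀ a b, g (a ^^^ b) = g a ^^^ g b) :
    ∀ (m k v : Nat),
      nApply ((List.range m).map (fun i => g (2 ^ (i + k)))) v = g ((v % 2 ^ m) <<< k) := by
  intro m
  induction m with
  | zero =>
    intro k v
    simp only [List.range_zero, List.map_nil]
    rw [pow_zero, Nat.mod_one, Nat.zero_shiftLeft, lin_zero g hg]
    rfl
  | succ m ih =>
    intro k v
    rw [List.range_succ_eq_map]
    simp only [List.map_cons, List.map_map]
    have hcomp : ((fun i => g (2 ^ (i + k))) ∘ Nat.succ) = (fun i => g (2 ^ (i + (k + 1)))) := by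
      funext i
      simp only [Function.comp]
      congr 2
      omega
    rw [hcomp]
    simp only [nApply]
    rw [ih (k + 1) (v / 2)]
    have hhead : (if v % 2 = 1 then g (2 ^ (0 + k)) else 0) = g ((v % 2) <<< k) := by
      rcases Nat.mod_two_eq_zero_or_one v with h | h
      · rw [h, if_neg (by omega), Nat.zero_shiftLeft, lin_zero g hg]
      · rw [h, if_pos rfl]
        congr 1
        rw [Nat.shiftLeft_eq]
        simp
    rw [hhead, ← hg, key_bits]

theorem nApply_rep24 (g : Nat → Nat) (hg : ∀ a b, g (a ^^^ b) = g a ^^^ g b)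
    (v : Nat) (hv : v < 16777216) :
    nApply ((List.range 24).map (fun i => g (2 ^ i))) v = g v := by
  have h := nApply_rep g hg 24 0 v
  simp only [Nat.add_zero, Nat.shiftLeft_zero] at h
  rw [h]
  congr 1
  rw [← pow24]
  omega

-- the squaring loop computes the iterate of the represented map
theorem pvLoop_rep : ∀ (n : Nat) (g : Nat → Nat), (∀ a b, g (a ^^^ b) = g a ^^^ g b) →
    (∀ w : Nat, g w < 16777216) → ∀ v : Nat, v < 16777216 →
    pvLoop (List.map (fun i => ((g (2 ^ i) : Nat) : Int)) (List.range 24)) (v : Int) n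
      = ((g^[n] v : Nat) : Int) := by
  intro n
  induction n using Nat.strong_induction_on with
  | _ n ih =>
    intro g hg hb v hv
    rw [pvLoop]
    by_cases hn : n = 0
    · rw [if_pos hn, hn, Function.iterate_zero_apply]
    · rw [if_neg hn]
      have hmat : ∀ w : Nat, w < 16777216 →
          pvApply (List.map (fun i => ((g (2 ^ i) : Nat) : Int)) (List.range 24)) ((w : Nat) : Int)
            = ((g w : Nat) : Int) := by
        intro w hw
        rw [show List.map (fun i => ((g (2 ^ i) : Nat) : Int)) (List.range 24)
              = List.map (fun (c : Nat) => (c : Int)) (List.map (fun i => g (2 ^ i)) (List.range 24)) by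
            rw [List.map_map]; rfl]
        rw [pvApply_cast, nApply_rep24 g hg w hw]
      have hsq : (List.map (fun i => ((g (2 ^ i) : Nat) : Int)) (List.range 24)).map
            (fun c => pvApply (List.map (fun i => ((g (2 ^ i) : Nat) : Int)) (List.range 24)) c)
          = List.map (fun i => (((g ∘ g) (2 ^ i) : Nat) : Int)) (List.range 24) := by
        rw [List.map_map]
        apply List.map_congr_left
        intro i _
        exact hmat (g (2 ^ i)) (hb _)
      have hvi : (if n % 2 = 1 then
            pvApply (List.map (fun i => ((g (2 ^ i) : Nat) : Int)) (List.range 24)) ((v : Nat) : Int)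
          else ((v : Nat) : Int))
          = (((if n % 2 = 1 then g v else v) : Nat) : Int) := by
        by_cases hp : n % 2 = 1
        · rw [if_pos hp, if_pos hp, hmat v hv]
        · rw [if_neg hp, if_neg hp]
      rw [hsq, hvi]
      rw [ih (n / 2) (by omega) (g ∘ g)
        (fun a b => by simp only [Function.comp_apply, hg])
        (fun w => hb _) _
        (by by_cases hp : n % 2 = 1
            · rw [if_pos hp]; exact hb v
            · rw [if_neg hp]; exact hv)]
      have hg2 : g^[2] = g ∘ g := by
        funext w
        rw [show (2 : Nat) = 1 + 1 from rfl, Function.iterate_add_apply, Function.iterate_one]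
        rfl
      congr 1
      rcases Nat.mod_two_eq_zero_or_one n with hp | hp
      · rw [if_neg (by omega)]
        conv_rhs => rw [show n = 2 * (n / 2) by omega]
        rw [Function.iterate_mul, hg2]
      · rw [if_pos hp]
        conv_rhs => rw [show n = 2 * (n / 2) + 1 by omega]
        rw [Function.iterate_succ_apply, Function.iterate_mul, hg2]

theorem pyband_natCast (a : Nat) :
    PySem.Int.band (a : Int) 16777215 = ((a % 16777216 : Nat) : Int) := by
  have h := PySem.Int.band_natCast a 16777215
  rw [show ((16777215 : Nat) : Int) = 16777215 by norm_num] at h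
  rw [h]
  congr 1
  rw [show (16777215 : Nat) = 2 ^ 24 - 1 by norm_num, Nat.and_two_pow_sub_one_eq_mod, ← pow24]

theorem pvStep_cast (a : Nat) : pvStep (a : Int) = ((nStep a : Nat) : Int) := by
  simp only [pvStep, ← Int.natCast_shiftLeft, ← Int.natCast_shiftRight,
    PySem.Int.bxor_natCast, pyband_natCast]
  rfl

-- ===== VERDICT (by name: the statement is the Claim_ definition above) =====
theorem calc_secret_spec : Claim_equal_calc_secret := by
  intro init count _
  unfold Spec_calc_secret calc_secret_alt
  by_cases hc : count ≤ 0
  · rw [if_pos hc]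
    unfold calc_secret
    rw [PySem.List.pyRange_of_pos 0 count (by norm_num), if_neg (by omega : ¬ (0 : Int) < count)]
    rfl
  · rw [if_neg hc]
    have hA : calc_secret init count = astepF^[(PySem.List.pyRange 0 count 1).length] init :=
      List.foldl_const astepF init _
    rw [hA]
    have hlen : (PySem.List.pyRange 0 count 1).length = count.toNat := by
      rw [PySem.List.pyRange_of_pos 0 count (by norm_num), if_pos (by omega : (0 : Int) < count)]
      simp only [List.length_map, List.length_range]
      rw [show count - 0 + 1 - 1 = count by ring, Int.ediv_one]
    rw [hlen]
    have hmnn := PySem.Int.mod_nonneg (a := init) (b := 16777216) (by norm_num)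
    have hmlt := PySem.Int.mod_lt (a := init) (b := 16777216) (by norm_num)
    have hv0lt : (PySem.Int.mod init 16777216).toNat < 16777216 := by omega
    have hcast : PySem.Int.mod init 16777216
        = (((PySem.Int.mod init 16777216).toNat : Nat) : Int) := by omega
    have hiter : ∀ (k m : Nat),
        astepF^[k] ((m : Nat) : Int) = ((nStep^[k] m : Nat) : Int) := by
      intro k
      induction k with
      | zero => intro m; rfl
      | succ k ihk =>
        intro m
        rw [Function.iterate_succ_apply, astepF_cast m, ihk (nStep m),
          Function.iterate_succ_apply]
    obtain ⟨n, hn⟩ : ∃ n : Nat, count.toNat = n + 1 := ⟨count.toNat - 1, by omega⟩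
    have hmat0 : List.map (fun (i : Nat) => pvStep ((1 : Int) <<< i)) (List.range 24)
        = List.map (fun i => ((nStep (2 ^ i) : Nat) : Int)) (List.range 24) := by
      apply List.map_congr_left
      intro i _
      have h1 : ((1 : Int) <<< i) = (((2 ^ i : Nat)) : Int) := by
        rw [Int.shiftLeft_eq]
        push_cast
        ring
      rw [h1, pvStep_cast]
    show astepF^[count.toNat] init
        = pvLoop (List.map (fun (i : Nat) => pvStep ((1 : Int) <<< i)) (List.range 24))
            (PySem.Int.mod init 16777216) count.toNat
    rw [hmat0, hcast,
      pvLoop_rep count.toNat nStep nStep_linear nStep_lt (PySem.Int.mod init 16777216).toNat hv0lt]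
    rw [hn, Function.iterate_succ_apply, astepF_eq init,
      hiter n (nStep (PySem.Int.mod init 16777216).toNat),
      ← Function.iterate_succ_apply]
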